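-- pv_equiv track=rewrite | github.com/1998apoorvmalik/linear-fold | arc_pairing_single_json.py | stru2pair
-- ===== SOURCE A (Python) =====
-- lbs = ['(', '[', '{', '<']
--
-- rbs = [')', ']', '}', '>']
--
-- def stru2pair(res):
--     #brackets for pseudoknot
--
--     pairs = set()
--
--     #pairing in result
--     stacks = []
--     for _ in range(len(lbs)):
--         stacks.append([])
--     for i, item in enumerate(res):
--         if item in lbs:
--             stackindex = lbs.index(item)
--             stacks[stackindex].append(i)
--         elif item in rbs:
--             stackindex = rbs.index(item)
--             left = stacks[stackindex][-1]
--             stacks[stackindex] = stacks[stackindex][:-1]    # stacks[stackindex].pop() ?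
--             pairs.add((left, i))
--
--     return pairs
-- ===== SOURCE B (Python) =====
-- lbs = ['(', '[', '{', '<']
--
-- rbs = [')', ']', '}', '>']
--
-- def stru2pair(res):
--     # One shared stack of (bracket_type, index) instead of four per-type stacks:
--     # on a right bracket, search the stack from the top for the last unmatched
--     # left bracket of the same type and remove it. Unmatched right brackets are
--     # skipped (A raises IndexError there; excluded by Pre_).
--     pairs = set()
--     stack = []
--     for i, ch in enumerate(res):
--         if ch in lbs:
--             stack.append((lbs.index(ch), i))
--         elif ch in rbs:
--             t = rbs.index(ch)
--             for j in range(len(stack) - 1, -1, -1):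
--                 if stack[j][0] == t:
--                     pairs.add((stack[j][1], i))
--                     del stack[j]
--                     break
--     return pairs
-- ===== Notes on version B (the rewrite author's own statement) =====
-- stated objective: alternative
-- what changed: Replaces the four per-type index-dispatched stacks with one shared stack of (type, index) pairs, matching a right bracket by searching that stack from the top for the last unmatched left bracket of the same type.
import Mathlib
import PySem

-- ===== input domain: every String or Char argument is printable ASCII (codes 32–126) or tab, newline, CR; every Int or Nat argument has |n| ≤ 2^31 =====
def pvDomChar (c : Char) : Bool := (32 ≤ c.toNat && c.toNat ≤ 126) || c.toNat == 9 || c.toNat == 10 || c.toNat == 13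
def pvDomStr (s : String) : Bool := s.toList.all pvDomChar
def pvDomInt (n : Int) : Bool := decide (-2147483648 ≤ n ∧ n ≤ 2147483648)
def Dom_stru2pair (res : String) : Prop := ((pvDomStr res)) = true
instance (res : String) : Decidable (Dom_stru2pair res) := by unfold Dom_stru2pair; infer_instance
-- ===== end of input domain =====

-- B replaces A's four per-type stacks by one shared stack of (type, index) pairs,
-- popped by searching from the top for the last left bracket of the matching type
-- (objective: alternative decomposition, same result).


-- ===== PORT A =====
def pvLbs : List Char := ['(', '[', '{', '<']
def pvRbs : List Char := [')', ']', '}', '>']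

-- A's loop body: four stacks (one per bracket type, dispatched by index) plus the pairs set.
def stru2pairStep (st : List (List Int) × PySem.Set (Int × Int)) (p : Int × Char) :
    List (List Int) × PySem.Set (Int × Int) :=
  match st, p with
  | (sts, pairs), (i, item) =>
    if pvLbs.contains item then
      let stackindex : Nat := (PySem.List.index? pvLbs item).getD 0
      (PySem.List.pySetD sts (stackindex : Int)
          (PySem.List.pyGetD sts (stackindex : Int) [] ++ [i]), pairs)
    else if pvRbs.contains item then
      let stackindex : Nat := (PySem.List.index? pvRbs item).getD 0
      let stk := PySem.List.pyGetD sts (stackindex : Int) []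
      match PySem.List.pyGet? stk (-1) with
      | some left =>
          (PySem.List.pySetD sts (stackindex : Int) (PySem.List.slice stk none (some (-1))),
           PySem.Set.add pairs (left, i))
      | none => (sts, pairs)   -- stacks[stackindex][-1]: Python raises IndexError here (excluded by Pre_)
    else (sts, pairs)

def stru2pair (res : String) : List (Int × Int) :=
  ((PySem.List.enumerate res.toList 0).foldl stru2pairStep
      ((PySem.List.pyRange 0 (pvLbs.length : Int) 1).foldl
          (fun st _ => st ++ [([] : List Int)]) [],
       PySem.Set.empty)).2

-- ===== PORT B =====
-- Source B's inner backwards search `for j in range(len(stack)-1, -1, -1): …`: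
-- remove the LAST element of the shared stack whose type equals t (recursion from
-- the far end of the list = scanning indices downwards), returning its index payload.
def pvPopLast (t : Int) : List (Int × Int) → Option (Int × List (Int × Int))
  | [] => none
  | x :: rest =>
    match pvPopLast t rest with
    | some (l, rest') => some (l, x :: rest')
    | none => if x.1 = t then some (x.2, rest) else none

def stru2pairAltStep (st : List (Int × Int) × PySem.Set (Int × Int)) (p : Int × Char) :
    List (Int × Int) × PySem.Set (Int × Int) :=
  match st, p with
  | (stack, pairs), (i, ch) =>
    match PySem.List.index? pvLbs ch with
    | some t => (stack ++ [((t : Int), i)], pairs)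
    | none =>
      match PySem.List.index? pvRbs ch with
      | some t =>
        match pvPopLast (t : Int) stack with
        | some (left, stack') => (stack', PySem.Set.add pairs (left, i))
        | none => (stack, pairs)   -- no matching left bracket: skipped
      | none => (stack, pairs)

def stru2pair_alt (res : String) : List (Int × Int) :=
  ((PySem.List.enumerate res.toList 0).foldl stru2pairAltStep ([], PySem.Set.empty)).2

-- ===== PRECONDITION & SPEC =====
-- Pre_ excludes exactly the strings with an unmatched right bracket, on which
-- Python A raises IndexError (stacks[stackindex][-1] on an empty stack).
def pvBalancedAt (cs : List Char) (l r : Char) : Prop :=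
  ∀ k, k < cs.length → cs.getD k ' ' = r → (cs.take k).count r < (cs.take k).count l

def Pre_stru2pair (res : String) : Prop :=
  pvBalancedAt res.toList '(' ')' ∧ pvBalancedAt res.toList '[' ']' ∧
  pvBalancedAt res.toList '{' '}' ∧ pvBalancedAt res.toList '<' '>'
instance (res : String) : Decidable (Pre_stru2pair res) := by unfold Pre_stru2pair pvBalancedAt; infer_instance

def pvWitness_stru2pair : String := "([{<a>}])()"

def Spec_stru2pair (res : String) (out : List (Int × Int)) : Prop := out = stru2pair_alt res
instance (res : String) (out : List (Int × Int)) : Decidable (Spec_stru2pair res out) := by unfold Spec_stru2pair; infer_instance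

-- ===== CLAIM (what is proved, stated in full; the proofs are below) =====
def Claim_equal_stru2pair : Prop := ∀ (res : String), Dom_stru2pair res → Pre_stru2pair res → Spec_stru2pair res (stru2pair res)

-- ===== LEMMAS AND PROOFS =====

-- the indices of the type-t entries of B's shared stack, bottom to top
def pvF (t : Int) (s : List (Int × Int)) : List Int :=
  (s.filter (fun x => decide (x.1 = t))).map Prod.snd

theorem pvF_cons (u : Int) (x : Int × Int) (s : List (Int × Int)) :
    pvF u (x :: s) = if x.1 = u then x.2 :: pvF u s else pvF u s := by
  simp only [pvF, List.filter_cons]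
  split_ifs with h <;> simp_all

theorem pvF_append (t : Int) (s : List (Int × Int)) (u i : Int) :
    pvF t (s ++ [(u, i)]) = if u = t then pvF t s ++ [i] else pvF t s := by
  simp only [pvF, List.filter_append]
  split_ifs with h <;> simp [h]

theorem pvPopLast_none_iff (t : Int) (s : List (Int × Int)) :
    pvPopLast t s = none ↔ pvF t s = [] := by
  induction s with
  | nil => simp [pvPopLast, pvF]
  | cons x rest ih =>
    rw [pvF_cons]
    simp only [pvPopLast]
    cases hr : pvPopLast t rest with
    | some v =>
      rw [hr] at ih
      simp only [reduceCtorEq, false_iff] at ih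
      split_ifs with hx <;> simp [ih]
    | none =>
      rw [hr] at ih
      simp only [true_iff] at ih
      split_ifs with hx <;> simp [ih]

theorem pvGetLast?_cons {a : Int} {L : List Int} (h : L ≠ []) :
    (a :: L).getLast? = L.getLast? := by
  cases L with
  | nil => simp at h
  | cons b M => simp [List.getLast?_cons_cons]

theorem pvPopLast_some_spec (t : Int) (s : List (Int × Int)) (l : Int) (s' : List (Int × Int))
    (h : pvPopLast t s = some (l, s')) :
    (pvF t s).getLast? = some l ∧
      ∀ u, pvF u s' = if u = t then (pvF t s).dropLast else pvF u s := by
  induction s generalizing l s' with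
  | nil => simp [pvPopLast] at h
  | cons x rest ih =>
    simp only [pvPopLast] at h
    cases hr : pvPopLast t rest with
    | some v =>
      obtain ⟨l0, rest'⟩ := v
      rw [hr] at h
      simp only [Option.some.injEq, Prod.mk.injEq] at h
      obtain ⟨hl, hs'⟩ := h
      obtain ⟨hlast, hF⟩ := ih l0 rest' hr
      have hne : pvF t rest ≠ [] := by
        intro hnil; rw [hnil] at hlast; simp at hlast
      subst hl hs'
      constructor
      · rw [pvF_cons]
        split_ifs with hx
        · rw [pvGetLast?_cons hne]; exact hlast
        · exact hlast
      · intro u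
        have hFu := hF u
        by_cases hu : u = t <;> by_cases hx : x.1 = u <;>
          simp_all [pvF_cons, List.dropLast_cons_of_ne_nil hne]
    | none =>
      rw [hr] at h
      have hFr : pvF t rest = [] := (pvPopLast_none_iff t rest).mp hr
      split_ifs at h with hx
      · simp only [Option.some.injEq, Prod.mk.injEq] at h
        obtain ⟨hl, hs'⟩ := h
        subst hl hs'
        constructor
        · rw [pvF_cons]; simp [hx, hFr]
        · intro u
          by_cases hu : u = t
          · subst hu; rw [pvF_cons, if_pos hx, hFr]; simp
          · have hxu : ¬ x.1 = u := by rw [hx]; exact fun hh => hu hh.symm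
            simp [pvF_cons, hu, hxu]

-- the simulation map: B's shared stack determines A's four stacks
def pvG (cp : List (Int × Int) × PySem.Set (Int × Int)) :
    List (List Int) × PySem.Set (Int × Int) :=
  ([pvF 0 cp.1, pvF 1 cp.1, pvF 2 cp.1, pvF 3 cp.1], cp.2)

theorem pvStep (cp : List (Int × Int) × PySem.Set (Int × Int)) (p : Int × Char) :
    stru2pairStep (pvG cp) p = pvG (stru2pairAltStep cp p) := by
  obtain ⟨comb, pairs⟩ := cp
  obtain ⟨i, item⟩ := p
  cases hl : PySem.List.index? pvLbs item with
  | some t =>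
    have hmem : item ∈ pvLbs := by
      have := (PySem.List.index?_isSome_iff pvLbs item).mp (by rw [hl]; rfl)
      exact this
    obtain ⟨hk, _, _⟩ := PySem.List.getElem_of_index?_eq_some hl
    have ht4 : t < 4 := by simpa [pvLbs] using hk
    simp only [stru2pairStep, stru2pairAltStep, pvG, hl, List.contains_iff_mem.mpr hmem,
      if_true, Option.getD_some]
    interval_cases t <;>
      simp [PySem.List.pySetD_of_nonneg, PySem.List.pyGetD_of_nonneg, List.set, pvF_append]
  | none =>
    have hnmem : item ∉ pvLbs := (PySem.List.index?_eq_none_iff pvLbs item).mp hl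
    have hcl : pvLbs.contains item = false := by
      simp [hnmem]
    cases hr : PySem.List.index? pvRbs item with
    | some t =>
      have hmem : item ∈ pvRbs := by
        have := (PySem.List.index?_isSome_iff pvRbs item).mp (by rw [hr]; rfl)
        exact this
      obtain ⟨hk, _, _⟩ := PySem.List.getElem_of_index?_eq_some hr
      have ht4 : t < 4 := by simpa [pvRbs] using hk
      simp only [stru2pairStep, stru2pairAltStep, pvG, hl, hr, hcl,
        List.contains_iff_mem.mpr hmem, if_true, Bool.false_eq_true, if_false,
        Option.getD_some]
      cases hp : pvPopLast (t : Int) comb with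
      | none =>
        have hFt : pvF (t : Int) comb = [] := (pvPopLast_none_iff _ _).mp hp
        interval_cases t <;>
          simp_all [PySem.List.pyGetD_of_nonneg, PySem.List.pyGet?_neg_one]
      | some v =>
        obtain ⟨left, comb'⟩ := v
        obtain ⟨hlast, hF⟩ := pvPopLast_some_spec _ _ _ _ hp
        interval_cases t <;>
          · simp only [Nat.cast_zero, Nat.cast_one, Nat.cast_ofNat] at hlast
            simp [PySem.List.pyGetD_of_nonneg, PySem.List.pyGet?_neg_one, hlast,
              PySem.List.slice_to_neg_one, PySem.List.pySetD_of_nonneg, List.set, hF]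
    | none =>
      have hnmem' : item ∉ pvRbs := (PySem.List.index?_eq_none_iff pvRbs item).mp hr
      have hcr : pvRbs.contains item = false := by
        simp [hnmem']
      have hli : List.idxOf? item pvLbs = none := by
        simpa [PySem.List.index?_eq_idxOf?] using hl
      have hri : List.idxOf? item pvRbs = none := by
        simpa [PySem.List.index?_eq_idxOf?] using hr
      simp [stru2pairStep, stru2pairAltStep, pvG, hli, hri, hnmem, hnmem']

theorem pvMain (ps : List (Int × Char)) (cp : List (Int × Int) × PySem.Set (Int × Int)) :
    ps.foldl stru2pairStep (pvG cp) = pvG (ps.foldl stru2pairAltStep cp) :=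
  List.foldl_hom pvG (fun s p => pvStep s p)

-- ===== VERDICT (by name: the statement is the Claim_ definition above) =====
theorem stru2pair_spec : Claim_equal_stru2pair := by
  intro res _ _
  unfold Spec_stru2pair stru2pair stru2pair_alt
  have h0 : ((PySem.List.pyRange 0 (pvLbs.length : Int) 1).foldl
      (fun st _ => st ++ [([] : List Int)]) [], (PySem.Set.empty : PySem.Set (Int × Int)))
      = pvG ([], PySem.Set.empty) := by decide
  rw [h0, pvMain]
  simp [pvG]
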